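-- pv_equiv track=rewrite | github.com/brianolson/redistricter | python/bdistricting/analyze_submissions.py | elementAfter
-- ===== SOURCE A (Python) =====
-- def elementAfter(haystack, needle):
--     """For some sequence haystack [a, needle, b], return b."""
--     isNext = False
--     for x in haystack:
--         if isNext:
--             return x
--         if x == needle:
--             isNext = True
--     return None
-- ===== SOURCE B (Python) =====
-- def elementAfter(haystack, needle):
--     """For some sequence haystack [a, needle, b], return b."""
--     seq = list(haystack)
--     try:
--         i = seq.index(needle)
--     except ValueError:
--         return None
--     if i + 1 < len(seq):
--         return seq[i + 1]
--     return None
-- ===== Notes on version B (the rewrite author's own statement) =====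
-- stated objective: idiomatic
-- what changed: Replaces the streaming flag-delay scan with a find-index-then-access-neighbor decomposition: list.index locates the needle (ValueError -> None) and the element at i+1 is returned if it exists.
import Mathlib
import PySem

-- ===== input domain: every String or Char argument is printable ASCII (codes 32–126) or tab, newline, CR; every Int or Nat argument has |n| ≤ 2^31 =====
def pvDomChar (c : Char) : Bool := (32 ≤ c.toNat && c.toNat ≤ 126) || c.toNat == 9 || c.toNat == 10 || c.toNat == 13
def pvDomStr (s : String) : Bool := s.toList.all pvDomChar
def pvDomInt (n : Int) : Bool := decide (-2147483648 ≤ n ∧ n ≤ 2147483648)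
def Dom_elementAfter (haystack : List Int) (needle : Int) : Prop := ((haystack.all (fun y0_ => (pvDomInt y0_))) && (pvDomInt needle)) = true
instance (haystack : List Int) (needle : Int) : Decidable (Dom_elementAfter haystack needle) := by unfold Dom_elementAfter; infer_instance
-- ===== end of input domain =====

-- B replaces A's streaming flag-delay scan by an index-then-neighbor decomposition (idiomatic, same cost).


-- ===== PORT A =====
-- the for-loop with the delayed flag `isNext`
def elementAfterLoop (haystack : List Int) (needle : Int) (isNext : Bool) : Option Int :=
  match haystack with
  | [] => none
  | x :: rest =>
    if isNext then some x
    else elementAfterLoop rest needle (if x == needle then true else isNext)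

def elementAfter (haystack : List Int) (needle : Int) : Option Int :=
  elementAfterLoop haystack needle false

-- ===== PORT B =====
def elementAfter_alt (haystack : List Int) (needle : Int) : Option Int :=
  match PySem.List.index? haystack needle with
  | none => none
  | some i =>
    if (i : Int) + 1 < (haystack.length : Int) then PySem.List.pyGet? haystack ((i : Int) + 1)
    else none

-- ===== PRECONDITION & SPEC =====
def Spec_elementAfter (haystack : List Int) (needle : Int) (out : Option Int) : Prop := out = elementAfter_alt haystack needle
instance (haystack : List Int) (needle : Int) (out : Option Int) : Decidable (Spec_elementAfter haystack needle out) := by unfold Spec_elementAfter; infer_instance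

-- ===== CLAIM (what is proved, stated in full; the proofs are below) =====
def Claim_equal_elementAfter : Prop := ∀ (haystack : List Int) (needle : Int), Dom_elementAfter haystack needle → Spec_elementAfter haystack needle (elementAfter haystack needle)

-- ===== LEMMAS AND PROOFS =====

-- once the flag is set, the loop returns the next element (head of the rest)
theorem elementAfterLoop_true (haystack : List Int) (needle : Int) :
    elementAfterLoop haystack needle true = haystack.head? := by
  cases haystack <;> simp [elementAfterLoop]

theorem elementAfter_eq_alt (haystack : List Int) (needle : Int) :
    elementAfterLoop haystack needle false = elementAfter_alt haystack needle := by
  induction haystack with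
  | nil => simp [elementAfterLoop, elementAfter_alt, PySem.List.index?]
  | cons x rest ih =>
    by_cases hx : x = needle
    · subst hx
      rw [elementAfterLoop]
      simp only [BEq.rfl, if_true, elementAfterLoop_true]
      rw [elementAfter_alt, PySem.List.index?_cons_self]
      cases rest with
      | nil => simp
      | cons y t =>
        have h1 : ((0 : Nat) : Int) + 1 = ((1 : Nat) : Int) := by norm_num
        simp only [h1]
        rw [PySem.List.pyGet?_natCast]
        simp
    · have hbx : (x == needle) = false := by simp [hx]
      rw [elementAfterLoop, hbx]
      simp only [Bool.false_eq_true, if_false]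
      rw [ih]
      unfold elementAfter_alt
      rw [PySem.List.index?_cons_of_ne rest hx]
      cases hidx : PySem.List.index? rest needle with
      | none => simp
      | some i =>
        simp only [Option.map_some]
        have h1 : ((i + 1 : Nat) : Int) + 1 = ((i + 2 : Nat) : Int) := by push_cast; ring
        have h2 : ((i : Nat) : Int) + 1 = ((i + 1 : Nat) : Int) := by push_cast; ring
        rw [h1, h2, PySem.List.pyGet?_natCast, PySem.List.pyGet?_natCast]
        simp only [List.length_cons]
        by_cases hlt : i + 1 < rest.length
        · rw [if_pos (by push_cast; omega), if_pos (by push_cast; omega)]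
          have : i + 2 = (i + 1) + 1 := rfl
          rw [this, List.getElem?_cons_succ]
        · rw [if_neg (by push_cast; omega), if_neg (by push_cast; omega)]

-- ===== VERDICT (by name: the statement is the Claim_ definition above) =====
theorem elementAfter_spec : Claim_equal_elementAfter := by
  intro haystack needle _
  unfold Spec_elementAfter elementAfter
  exact elementAfter_eq_alt haystack needle
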